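-- pv_equiv track=rewrite | github.com/ckuethe/geigerlog | gsup_utils.py | BytesAsDec
-- ===== SOURCE A (Python) =====
-- def BytesAsDec(bytestring):
--     """convert a bytes string into a str of Dec values, with dash spaces
--     every 10 bytes and LF every 40"""
--
--     bad = ""
--     if bytestring is None: return bad
--
--     bad += "{:3n}:0x{:03X} ".format(0, 0)
--     for i in range(0, len(bytestring)):
--         bad += " {:3d}".format(bytestring[i])
--         if   ((i + 1) % 40) == 0 :
--             bad += "\n"  # no '- '
--             bad += "{:3n}:0x{:03X} ".format(i + 1, i + 1)
--
--         elif ((i + 1) % 10) == 0 :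
--             bad += "   "
--
--     return bad
-- ===== SOURCE B (Python) =====
-- def BytesAsDec(bytestring):
--     """convert a bytes string into a str of Dec values, with dash spaces
--     every 10 bytes and LF every 40"""
--     if bytestring is None:
--         return ""
--     out = []
--     off = 0
--     while True:
--         chunk = bytestring[off:off + 40]
--         out.append("{:3n}:0x{:03X} ".format(off, off))
--         j = 0
--         while j < len(chunk):
--             grp = chunk[j:j + 10]
--             out.append("".join(" {:3d}".format(b) for b in grp))
--             if len(grp) == 10 and j < 30:
--                 out.append("   ")
--             j += 10
--         if len(chunk) < 40:
--             break
--         out.append("\n")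
--         off += 40
--     return "".join(out)
-- ===== Notes on version B (the rewrite author's own statement) =====
-- stated objective: alternative
-- what changed: A is a single loop over byte indexes that decides separators with (i+1)%40 and (i+1)%10 modulo tests; B instead decomposes the output explicitly into 40-byte lines and 10-byte groups, emitting each line's header, its groups and the group/line separators structurally.
import Mathlib
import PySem

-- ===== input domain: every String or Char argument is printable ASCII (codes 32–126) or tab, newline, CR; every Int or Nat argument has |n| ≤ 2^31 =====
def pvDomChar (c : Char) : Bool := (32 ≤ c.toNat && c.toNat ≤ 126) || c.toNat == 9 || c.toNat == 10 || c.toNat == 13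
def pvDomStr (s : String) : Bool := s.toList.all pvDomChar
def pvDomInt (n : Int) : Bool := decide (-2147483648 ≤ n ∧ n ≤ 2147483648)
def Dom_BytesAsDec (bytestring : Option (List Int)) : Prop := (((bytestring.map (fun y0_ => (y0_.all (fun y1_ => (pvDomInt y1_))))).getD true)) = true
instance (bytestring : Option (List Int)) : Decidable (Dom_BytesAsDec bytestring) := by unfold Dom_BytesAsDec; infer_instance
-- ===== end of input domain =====

-- B rewrites A's single indexed loop with modulo tests as an explicit line/group
-- (40-byte / 10-byte) decomposition; objective: alternative structure, same cost.

-- ===== PORT A =====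
-- "{:3d}".format-style right-justify to width 3 (exact for Python's int formatting)
def pad3 (s : String) : String := String.mk (List.replicate (3 - s.toList.length) ' ') ++ s
-- "{:03X}".format n : uppercase hex, zero-padded to width 3 (n ≥ 0 here)
def hex3 (n : Nat) : String :=
  let ds := (Nat.toDigits 16 n).map Char.toUpper
  String.mk (List.replicate (3 - ds.length) '0') ++ String.mk ds
-- "{:3n}:0x{:03X} ".format i i  ( :n = :d in the C locale )
def fmtHeader (i : Nat) : String := pad3 (PySem.Int.toStr i) ++ ":0x" ++ hex3 i ++ " "
-- " {:3d}".format b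
def fmtByte (b : Int) : String := " " ++ pad3 (PySem.Int.toStr b)

def BytesAsDec (bytestring : Option (List Int)) : String :=
  match bytestring with
  | none => ""
  | some bs =>
      -- for i in range(0, len(bytestring)): … (bytestring[i] is always in range)
      (List.range bs.length).foldl
        (fun bad i =>
          let bad := bad ++ fmtByte (bs.getD i 0)
          if (i + 1) % 40 == 0 then bad ++ "\n" ++ fmtHeader (i + 1)
          else if (i + 1) % 10 == 0 then bad ++ "   "
          else bad)
        (fmtHeader 0)

-- ===== PORT B =====
-- "".join(" {:3d}".format(b) for b in grp)
def groupStr (grp : List Int) : String := String.join (grp.map fmtByte)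

-- inner while loop of Source B: groups of 10 within one line; j = local index
def Grec (j : Nat) (rest : List Int) : String :=
  if h : rest = [] then ""
  else
    groupStr (rest.take 10) ++
      (if (rest.take 10).length = 10 ∧ j < 30 then "   " else "") ++
      Grec (j + 10) (rest.drop 10)
termination_by rest.length
decreasing_by
  simp only [List.length_drop]
  cases rest with
  | nil => exact absurd rfl h
  | cons a t => simp

-- outer while loop of Source B: one 40-byte line at offset off, then the remainder
def Brec (off : Nat) (bs : List Int) : String :=
  fmtHeader off ++ Grec 0 (bs.take 40) ++
    (if h : bs.length < 40 then "" else "\n" ++ Brec (off + 40) (bs.drop 40))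
termination_by bs.length
decreasing_by simp only [List.length_drop]; omega

def BytesAsDec_alt (bytestring : Option (List Int)) : String :=
  match bytestring with
  | none => ""
  | some bs => Brec 0 bs

-- ===== PRECONDITION & SPEC =====
def Spec_BytesAsDec (bytestring : Option (List Int)) (out : String) : Prop := out = BytesAsDec_alt bytestring
instance (bytestring : Option (List Int)) (out : String) : Decidable (Spec_BytesAsDec bytestring out) := by unfold Spec_BytesAsDec; infer_instance

-- ===== CLAIM (what is proved, stated in full; the proofs are below) =====
def Claim_equal_BytesAsDec : Prop := ∀ (bytestring : Option (List Int)), Dom_BytesAsDec bytestring → Spec_BytesAsDec bytestring (BytesAsDec bytestring)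

-- ===== LEMMAS AND PROOFS =====

-- per-byte view of A's loop body after byte with 1-based global index m
def sfx (m : Nat) : String :=
  if m % 40 == 0 then "\n" ++ fmtHeader m
  else if m % 10 == 0 then "   "
  else ""

-- A's loop as structural recursion over the remaining bytes, off = bytes consumed
def Jrec (off : Nat) : List Int → String
  | [] => ""
  | b :: t => fmtByte b ++ sfx (off + 1) ++ Jrec (off + 1) t

-- per-byte view of B's line body: "   " after local 1-based index q+1 when it is
-- a multiple of 10 below 40
def Lrec (q : Nat) : List Int → String
  | [] => ""
  | b :: t => fmtByte b ++ (if (q + 1) % 10 = 0 ∧ q + 1 < 40 then "   " else "") ++ Lrec (q + 1) t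

theorem strFoldl : ∀ (l : List String) (s : String), l.foldl (· ++ ·) s = s ++ l.foldl (· ++ ·) "" := by
  intro l
  induction l with
  | nil => intro s; simp
  | cons a t ih =>
    intro s
    simp only [List.foldl_cons]
    rw [ih (s ++ a), ih ("" ++ a)]
    simp [String.append_assoc]

theorem groupStr_cons (b : Int) (t : List Int) : groupStr (b :: t) = fmtByte b ++ groupStr t := by
  simp only [groupStr, List.map_cons, String.join, List.foldl_cons]
  rw [strFoldl]
  simp

theorem Lrec_group (c : Nat) : ∀ (rest : List Int) (q : Nat), 0 < c → c ≤ 10 → (q + c) % 10 = 0 →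
    Lrec q rest =
      if rest.length < c then groupStr rest
      else groupStr (rest.take c) ++ (if q + c < 40 then "   " else "") ++ Lrec (q + c) (rest.drop c) := by
  induction c with
  | zero => intro rest q h; omega
  | succ c ih =>
    intro rest q _ hc hm
    cases rest with
    | nil => simp [Lrec, groupStr, String.join]
    | cons b t =>
      simp only [Lrec]
      by_cases hc0 : c = 0
      · subst hc0
        have h10 : (q + 1) % 10 = 0 := hm
        rw [if_neg (show ¬ ((b :: t).length < 1) by simp)]
        simp only [List.take_succ_cons, List.take_zero, List.drop_succ_cons, List.drop_zero]
        rw [groupStr_cons]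
        simp [h10, groupStr, String.join, String.append_assoc]
      · have hne : ¬ ((q + 1) % 10 = 0) := by omega
        rw [if_neg (fun h => hne h.1)]
        rw [ih t (q + 1) (by omega) (by omega) (by omega)]
        by_cases hl : t.length < c
        · rw [if_pos hl, if_pos (show (b :: t).length < c + 1 by simp; omega)]
          rw [groupStr_cons]
          simp
        · rw [if_neg hl, if_neg (show ¬ ((b :: t).length < c + 1) by simp; omega)]
          simp only [List.take_succ_cons, List.drop_succ_cons]
          rw [groupStr_cons]
          have e : q + 1 + c = q + (c + 1) := by ring
          rw [e]
          simp [String.append_assoc]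

theorem Grec_nil (j : Nat) : Grec j [] = "" := by rw [Grec]; simp

theorem Grec_eq_Lrec_aux (n : Nat) : ∀ (rest : List Int) (j : Nat), rest.length ≤ n → j % 10 = 0 →
    Grec j rest = Lrec j rest := by
  induction n with
  | zero =>
    intro rest j hlen _
    have : rest = [] := by cases rest with | nil => rfl | cons a t => simp at hlen
    subst this; rw [Grec_nil]; rfl
  | succ n ihn =>
    intro rest j hlen hj
    rw [Grec]
    by_cases h : rest = []
    · subst h; simp [Lrec]
    · rw [dif_neg h]
      rw [Lrec_group 10 rest j (by omega) (le_refl 10) (by omega)]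
      by_cases hlt : rest.length < 10
      · rw [if_pos hlt]
        have h10 : ¬ ((rest.take 10).length = 10) := by simp; omega
        have hdn : rest.drop 10 = [] := List.drop_eq_nil_of_le (by omega)
        have ht : rest.take 10 = rest := List.take_of_length_le (by omega)
        rw [hdn, Grec_nil, ht, if_neg (fun hh => absurd hh.1 (by omega))]
        simp
      · rw [if_neg hlt]
        have h10 : (rest.take 10).length = 10 := by simp; omega
        rw [ihn (rest.drop 10) (j + 10) (by simp; omega) (by omega)]
        by_cases hj30 : j < 30
        · rw [if_pos ⟨h10, hj30⟩, if_pos (by omega)]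
        · rw [if_neg (fun hh => hj30 hh.2), if_neg (by omega)]

theorem Grec_eq_Lrec (rest : List Int) (j : Nat) (hj : j % 10 = 0) : Grec j rest = Lrec j rest :=
  Grec_eq_Lrec_aux rest.length rest j le_rfl hj

theorem Jrec_line (rest : List Int) : ∀ (q off : Nat), 40 ∣ off → q < 40 →
    Jrec (off + q) rest =
      if q + rest.length < 40 then Lrec q rest
      else Lrec q (rest.take (40 - q)) ++ "\n" ++ fmtHeader (off + 40) ++ Jrec (off + 40) (rest.drop (40 - q)) := by
  induction rest with
  | nil =>
    intro q off _ hq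
    rw [if_pos (by simpa using hq)]
    rfl
  | cons b t ih =>
    intro q off hoff hq
    simp only [Jrec]
    by_cases hlt : q + 1 < 40
    · have hsfx : sfx (off + q + 1) = (if (q + 1) % 10 = 0 ∧ q + 1 < 40 then "   " else "") := by
        simp only [sfx]
        have hb : ((off + q + 1) % 40 == 0) = false := by
          simp only [beq_eq_false_iff_ne, ne_eq]; omega
        rw [hb]
        by_cases h10 : (q + 1) % 10 = 0
        · have hb2 : ((off + q + 1) % 10 == 0) = true := by simp only [beq_iff_eq]; omega
          simp [hb2, h10, hlt]
        · have hb2 : ((off + q + 1) % 10 == 0) = false := by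
            simp only [beq_eq_false_iff_ne, ne_eq]; omega
          simp [hb2, h10]
      rw [hsfx]
      have e1 : off + q + 1 = off + (q + 1) := by ring
      rw [e1, ih (q + 1) off hoff hlt]
      by_cases h2 : q + 1 + t.length < 40
      · rw [if_pos h2, if_pos (show q + (b :: t).length < 40 by simp; omega)]
        simp [Lrec, String.append_assoc]
      · rw [if_neg h2, if_neg (show ¬ (q + (b :: t).length < 40) by simp; omega)]
        have e40 : 40 - q = (40 - (q + 1)) + 1 := by omega
        rw [e40]
        simp only [List.take_succ_cons, List.drop_succ_cons, Lrec]
        simp [String.append_assoc]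
    · have hq40 : q + 1 = 40 := by omega
      have e : off + q + 1 = off + 40 := by omega
      have hsfx : sfx (off + 40) = "\n" ++ fmtHeader (off + 40) := by
        have h0 : ((off + 40) % 40 == 0) = true := by simp only [beq_iff_eq]; omega
        simp [sfx, show off % 40 = 0 by omega]
      rw [e, hsfx]
      rw [if_neg (show ¬ (q + (b :: t).length < 40) by simp; omega)]
      have e40 : 40 - q = 1 := by omega
      rw [e40]
      simp only [List.take_succ_cons, List.take_zero, List.drop_succ_cons, List.drop_zero, Lrec]
      rw [if_neg (by omega)]
      simp [String.append_assoc]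

theorem main_eq_aux (n : Nat) : ∀ (bs : List Int) (off : Nat), bs.length ≤ n → 40 ∣ off →
    fmtHeader off ++ Jrec off bs = Brec off bs := by
  induction n with
  | zero =>
    intro bs off hlen _
    have : bs = [] := by cases bs with | nil => rfl | cons a t => simp at hlen
    subst this
    rw [Brec]
    simp [Jrec, Grec_nil]
  | succ n ihn =>
    intro bs off hlen hoff
    rw [Brec]
    have hJ := Jrec_line bs 0 off hoff (by omega)
    simp only [Nat.add_zero, Nat.zero_add, Nat.sub_zero] at hJ
    by_cases h40 : bs.length < 40
    · rw [dif_pos h40, hJ, if_pos (by omega)]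
      rw [Grec_eq_Lrec _ 0 rfl, List.take_of_length_le (by omega)]
      simp
    · rw [dif_neg h40, hJ, if_neg (by omega)]
      rw [Grec_eq_Lrec _ 0 rfl]
      rw [← ihn (bs.drop 40) (off + 40) (by simp; omega) (Nat.dvd_add hoff (dvd_refl 40))]
      simp [String.append_assoc]

theorem main_eq (bs : List Int) (off : Nat) (hoff : 40 ∣ off) :
    fmtHeader off ++ Jrec off bs = Brec off bs :=
  main_eq_aux bs.length bs off le_rfl hoff

theorem A_fold (bs : List Int) : ∀ (l : List Int) (k : Nat) (init : String), bs.drop k = l →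
    (List.range' k l.length).foldl
      (fun bad i =>
        let bad := bad ++ fmtByte (bs.getD i 0)
        if (i + 1) % 40 == 0 then bad ++ "\n" ++ fmtHeader (i + 1)
        else if (i + 1) % 10 == 0 then bad ++ "   "
        else bad) init = init ++ Jrec k l := by
  intro l
  induction l with
  | nil => intro k init _; simp [Jrec]
  | cons b t ih =>
      intro k init hdrop
      have hb : bs.getD k 0 = b := by
        have h0 : (bs.drop k).getD 0 0 = b := by rw [hdrop]; rfl
        have this : (bs.drop k)[0]? = bs[k + 0]? := List.getElem?_drop ..
        simp only [Nat.add_zero] at this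
        simp only [List.getD, this] at h0 ⊢
        exact h0
      have ht : bs.drop (k + 1) = t := by
        have : (bs.drop k).drop 1 = bs.drop (k + 1) := by
          rw [List.drop_drop]
        rw [← this, hdrop]; rfl
      rw [List.length_cons, List.range'_succ, List.foldl_cons, ih (k + 1) _ ht]
      simp only [hb, Jrec, sfx]
      split_ifs with h1 h2 <;> simp_all [String.append_assoc]

-- ===== VERDICT (by name: the statement is the Claim_ definition above) =====
theorem BytesAsDec_spec : Claim_equal_BytesAsDec := by
  intro bytestring _
  unfold Spec_BytesAsDec BytesAsDec BytesAsDec_alt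
  cases bytestring with
  | none => rfl
  | some bs =>
      simp only
      rw [List.range_eq_range', A_fold bs bs 0 _ List.drop_zero]
      exact main_eq bs 0 ⟨0, rfl⟩
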